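-- pv_equiv track=rewrite | github.com/YSU-ISU-Lab/SKDCH_TMM2023 | SKDCH-it/xmedia/student/utils.py | make_test_dict
-- ===== SOURCE A (Python) =====
-- def list_split(items):
--     return [items[i: i + 1] for i in range(0, len(items), 1)]
--
-- def is_same_cate(strA, strB, label_dim):
--     labelA = list_split(strA)
--     labelB = list_split(strB)
--
--     for i in range(label_dim):
--         if labelA[i] == [1] and labelA[i] == labelB[i]:
--             return True
--     return False
--
-- def push_query(query, url, dict):
--     if query[0] in dict:
--         dict[query[0]].append(url[0])
--     else:
--         dict[query[0]] = [url[0]]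
--     return dict
--
-- def make_test_dict(query_list, url_list, query_label, url_label, label_dim):
--     query_url = {}
--     query_pos = {}
--     query_num = len(query_list)
--     url_num = len(url_list)
--
--     for i in range(query_num):
--         query = query_list[i]
--         for j in range(url_num):
--             url = url_list[j]
--             if is_same_cate(query_label[i], url_label[j], label_dim):
--                 push_query(query, url, query_url)
--                 push_query(query, url, query_pos)
--             else:
--                 push_query(query, url, query_url)
--     return query_url, query_pos
-- ===== SOURCE B (Python) =====
-- def make_test_dict(query_list, url_list, query_label, url_label, label_dim):
--     url_num = len(url_list)
--     all_urls = [u[0] for u in url_list]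
--     # Inverted index: for each label position i, the url indices active at i (ascending).
--     buckets = [[j for j in range(url_num) if url_label[j][i] == 1]
--                for i in range(label_dim)]
--     query_url = {}
--     query_pos = {}
--     for q, qlab in zip(query_list, query_label):
--         key = q[0]
--         hit = set()
--         for i in range(label_dim):
--             if qlab[i] == 1:
--                 hit.update(buckets[i])
--         if all_urls:
--             query_url.setdefault(key, []).extend(all_urls)
--         if hit:
--             query_pos.setdefault(key, []).extend(all_urls[j] for j in sorted(hit))
--     return query_url, query_pos
-- ===== Notes on version B (the rewrite author's own statement) =====
-- stated objective: alternative
-- what changed: B replaces A's per-pair nested url scan with an inverted index: it precomputes, per label position, the list of url indices active there, then for each query takes the set union of the buckets of its active positions and reads the matching urls off sorted(hit); query_url is filled by extending with the prebuilt url-head list once per query.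
-- outside the precondition, e.g. on make_test_dict([[1]], [[2]], [[1]], [[1]], 2): A returns ({1: [2]}, {1: [2]}), B raises IndexError; on make_test_dict([[]], [], [[1]], [], 1): A returns ({}, {}), B raises IndexError
import Mathlib
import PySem

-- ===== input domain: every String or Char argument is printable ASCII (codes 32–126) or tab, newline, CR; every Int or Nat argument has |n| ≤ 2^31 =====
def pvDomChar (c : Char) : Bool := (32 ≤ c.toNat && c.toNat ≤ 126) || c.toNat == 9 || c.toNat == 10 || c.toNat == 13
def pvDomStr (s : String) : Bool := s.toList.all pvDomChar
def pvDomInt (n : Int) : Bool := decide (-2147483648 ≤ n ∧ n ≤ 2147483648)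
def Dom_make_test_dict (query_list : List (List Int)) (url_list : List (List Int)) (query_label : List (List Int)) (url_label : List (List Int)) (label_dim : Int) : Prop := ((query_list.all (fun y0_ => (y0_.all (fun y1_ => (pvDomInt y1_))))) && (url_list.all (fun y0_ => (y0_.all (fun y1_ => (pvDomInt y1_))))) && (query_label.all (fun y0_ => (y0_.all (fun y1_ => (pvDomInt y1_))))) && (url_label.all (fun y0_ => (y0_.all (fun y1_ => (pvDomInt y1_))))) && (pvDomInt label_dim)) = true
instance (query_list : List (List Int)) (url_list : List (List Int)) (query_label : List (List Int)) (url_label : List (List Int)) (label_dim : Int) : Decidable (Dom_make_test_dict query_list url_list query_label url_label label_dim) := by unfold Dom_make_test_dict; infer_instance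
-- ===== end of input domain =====

-- B replaces A's per-pair url scan with an inverted index (label position → active url indices):
-- per query it unions the buckets of the query's active positions and reads the matches off the
-- sorted union (a different data structure / traversal; neither program mutates its arguments).

-- ===== PORT A =====
def pvListSplit (items : List Int) : List (List Int) :=
  (PySem.List.pyRange 0 (PySem.List.len items) 1).map
    (fun i => PySem.List.slice items (some i) (some (i + 1)))

def pvIsSameCate (strA strB : List Int) (label_dim : Int) : Bool :=
  let labelA := pvListSplit strA
  let labelB := pvListSplit strB
  (PySem.List.pyRange 0 label_dim 1).any (fun i =>
    (PySem.List.pyGet? labelA i == some [1]) &&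
    (PySem.List.pyGet? labelA i == PySem.List.pyGet? labelB i))

def pvPushQuery (query url : List Int) (d : PySem.Dict Int (List Int)) : PySem.Dict Int (List Int) :=
  if d.contains (PySem.List.pyGetD query 0 0) then
    d.modify (PySem.List.pyGetD query 0 0) [] (fun l => l ++ [PySem.List.pyGetD url 0 0])
  else
    d.insert (PySem.List.pyGetD query 0 0) [PySem.List.pyGetD url 0 0]

def make_test_dict (query_list : List (List Int)) (url_list : List (List Int)) (query_label : List (List Int)) (url_label : List (List Int)) (label_dim : Int) : (List (Int × List Int)) × (List (Int × List Int)) :=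
  let query_num := PySem.List.len query_list
  let url_num := PySem.List.len url_list
  let res := (PySem.List.pyRange 0 query_num 1).foldl (fun st i =>
    let query := PySem.List.pyGetD query_list i []
    (PySem.List.pyRange 0 url_num 1).foldl (fun st2 j =>
      let url := PySem.List.pyGetD url_list j []
      if pvIsSameCate (PySem.List.pyGetD query_label i []) (PySem.List.pyGetD url_label j []) label_dim then
        (pvPushQuery query url st2.1, pvPushQuery query url st2.2)
      else
        (pvPushQuery query url st2.1, st2.2)) st) (PySem.Dict.empty, PySem.Dict.empty)
  (res.1.items, res.2.items)

-- ===== PORT B =====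
-- buckets[i] = [j for j in range(url_num) if url_label[j][i] == 1]
def pvBuckets (url_label : List (List Int)) (url_num label_dim : Int) : List (List Int) :=
  (PySem.List.pyRange 0 label_dim 1).map (fun i =>
    (PySem.List.pyRange 0 url_num 1).filter (fun j =>
      PySem.List.pyGetD (PySem.List.pyGetD url_label j []) i 0 == 1))

-- hit = set(); for i in range(label_dim): if qlab[i]==1: hit.update(buckets[i])
def pvHit (qlab : List Int) (buckets : List (List Int)) (label_dim : Int) : PySem.Set Int :=
  (PySem.List.pyRange 0 label_dim 1).foldl (fun h i =>
    if PySem.List.pyGetD qlab i 0 == 1 then PySem.Set.update h (PySem.List.pyGetD buckets i []) else h)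
    PySem.Set.empty

-- d.setdefault(k, []).extend(xs)
def pvSdExtend (d : PySem.Dict Int (List Int)) (k : Int) (xs : List Int) : PySem.Dict Int (List Int) :=
  (d.setdefault k []).modify k [] (fun l => l ++ xs)

def make_test_dict_alt (query_list : List (List Int)) (url_list : List (List Int)) (query_label : List (List Int)) (url_label : List (List Int)) (label_dim : Int) : (List (Int × List Int)) × (List (Int × List Int)) :=
  let url_num := PySem.List.len url_list
  let all_urls := url_list.map (fun u => PySem.List.pyGetD u 0 0)
  let buckets := pvBuckets url_label url_num label_dim
  let res := (query_list.zip query_label).foldl (fun st p =>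
    let key := PySem.List.pyGetD p.1 0 0
    let hit := pvHit p.2 buckets label_dim
    ((if all_urls.isEmpty then st.1 else pvSdExtend st.1 key all_urls),
     (if hit.isEmpty then st.2
      else pvSdExtend st.2 key
        ((PySem.List.sorted hit (fun x => x) false).map (fun j => PySem.List.pyGetD all_urls j 0)))))
    (PySem.Dict.empty, PySem.Dict.empty)
  (res.1.items, res.2.items)

-- ===== PRECONDITION & SPEC =====
-- Pre_ excludes exactly the inputs on which a used query/url is the empty list, a used label row is
-- missing, or label_dim exceeds a used label row's length: there A raises IndexError, or (when an
-- earlier label position happens to match, or the pair loop never reaches the bad row) A's returning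
-- at all is an accident of its scan order, and B's eager precomputation itself raises IndexError.
def Pre_make_test_dict (query_list : List (List Int)) (url_list : List (List Int)) (query_label : List (List Int)) (url_label : List (List Int)) (label_dim : Int) : Prop :=
  (∀ i : Nat, i < query_list.length →
      query_list.getD i [] ≠ [] ∧ i < query_label.length ∧
      label_dim ≤ ((query_label.getD i []).length : Int)) ∧
  (∀ j : Nat, j < url_list.length →
      url_list.getD j [] ≠ [] ∧ j < url_label.length ∧
      label_dim ≤ ((url_label.getD j []).length : Int))
instance (query_list : List (List Int)) (url_list : List (List Int)) (query_label : List (List Int)) (url_label : List (List Int)) (label_dim : Int) : Decidable (Pre_make_test_dict query_list url_list query_label url_label label_dim) := by unfold Pre_make_test_dict; infer_instance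

def pvWitness_make_test_dict : List (List Int) × List (List Int) × List (List Int) × List (List Int) × Int :=
  ([[1], [2]], [[3]], [[1, 0], [0, 1]], [[1, 1]], 2)

def Spec_make_test_dict (query_list : List (List Int)) (url_list : List (List Int)) (query_label : List (List Int)) (url_label : List (List Int)) (label_dim : Int) (out : (List (Int × List Int)) × (List (Int × List Int))) : Prop := out = make_test_dict_alt query_list url_list query_label url_label label_dim
instance (query_list : List (List Int)) (url_list : List (List Int)) (query_label : List (List Int)) (url_label : List (List Int)) (label_dim : Int) (out : (List (Int × List Int)) × (List (Int × List Int))) : Decidable (Spec_make_test_dict query_list url_list query_label url_label label_dim out) := by unfold Spec_make_test_dict; infer_instance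

-- ===== CLAIM (what is proved, stated in full; the proofs are below) =====
def Claim_equal_make_test_dict : Prop := ∀ (query_list : List (List Int)) (url_list : List (List Int)) (query_label : List (List Int)) (url_label : List (List Int)) (label_dim : Int), Dom_make_test_dict query_list url_list query_label url_label label_dim → Pre_make_test_dict query_list url_list query_label url_label label_dim → Spec_make_test_dict query_list url_list query_label url_label label_dim (make_test_dict query_list url_list query_label url_label label_dim)

-- ===== LEMMAS AND PROOFS =====

def pvPushV (k v : Int) (d : PySem.Dict Int (List Int)) : PySem.Dict Int (List Int) :=
  if d.contains k then d.modify k [] (fun l => l ++ [v]) else d.insert k [v]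

theorem pvPushQuery_eq (q u : List Int) (d : PySem.Dict Int (List Int)) :
    pvPushQuery q u d = pvPushV (PySem.List.pyGetD q 0 0) (PySem.List.pyGetD u 0 0) d := rfl

theorem pv_map_id_of_not_contains (d : PySem.Dict Int (List Int)) (k : Int) (w : List Int)
    (h : d.contains k = false) :
    d.items.map (fun p => if p.1 == k then (k, w) else p) = d.items := by
  have h' : ∀ p ∈ d.items, (p.1 == k) = false := by
    simpa [PySem.Dict.contains, List.any_eq_false] using h
  calc d.items.map (fun p => if p.1 == k then (k, w) else p)
      = d.items.map id := List.map_congr_left (fun p hp => by simp [h' p hp])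
    _ = d.items := List.map_id _

theorem pv_insert_insert (d : PySem.Dict Int (List Int)) (k : Int) (v w : List Int) :
    (d.insert k v).insert k w = d.insert k w := by
  apply PySem.Dict.ext
  have h1 : (d.insert k v).contains k = true := PySem.Dict.contains_insert_self d k v
  by_cases hc : d.contains k
  · rw [PySem.Dict.items_insert_of_contains _ _ h1, PySem.Dict.items_insert_of_contains _ _ hc,
        PySem.Dict.items_insert_of_contains _ _ hc, List.map_map]
    apply List.map_congr_left
    intro p hp
    by_cases hpk : p.1 = k <;> simp [hpk]
  · rw [PySem.Dict.items_insert_of_contains _ _ h1,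
        PySem.Dict.items_insert_of_not_contains _ _ (by simpa using hc),
        PySem.Dict.items_insert_of_not_contains _ _ (by simpa using hc),
        List.map_append]
    rw [pv_map_id_of_not_contains d k w (by simpa using hc)]
    simp

theorem pv_modify_modify (d : PySem.Dict Int (List Int)) (k : Int) (f g : List Int → List Int) :
    (d.modify k [] f).modify k [] g = d.modify k [] (fun l => g (f l)) := by
  show (d.modify k [] f).insert k (g ((d.modify k [] f).getD k [])) = _
  rw [PySem.Dict.getD_modify_self]
  show (d.insert k (f (d.getD k []))).insert k (g (f (d.getD k []))) = _
  exact pv_insert_insert _ _ _ _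

theorem pv_pushV_eq_modify (k v : Int) (d : PySem.Dict Int (List Int)) :
    pvPushV k v d = d.modify k [] (fun l => l ++ [v]) := by
  unfold pvPushV
  split_ifs with h
  · rfl
  · show d.insert k [v] = d.insert k (d.getD k [] ++ [v])
    rw [PySem.Dict.getD_of_not_contains d [] (by simpa using h)]
    rfl

theorem pv_sdExtend_eq_modify (d : PySem.Dict Int (List Int)) (k : Int) (xs : List Int) :
    pvSdExtend d k xs = d.modify k [] (fun l => l ++ xs) := by
  unfold pvSdExtend
  by_cases h : d.contains k
  · simp only [PySem.Dict.setdefault, h, if_true]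
  · have hf : d.contains k = false := by simpa using h
    have hsd : d.setdefault k [] = d.insert k [] := by
      simp only [PySem.Dict.setdefault, PySem.Dict.insert, hf, if_false, Bool.false_eq_true]
    rw [hsd]
    show (d.insert k []).insert k ((d.insert k []).getD k [] ++ xs)
        = d.insert k (d.getD k [] ++ xs)
    rw [PySem.Dict.getD_insert_self, PySem.Dict.getD_of_not_contains d [] hf,
        pv_insert_insert]

theorem pv_foldl_pushV_modify (k : Int) (vs : List Int) (d : PySem.Dict Int (List Int)) (ws : List Int) :
    vs.foldl (fun dd v => pvPushV k v dd) (d.modify k [] (fun l => l ++ ws))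
      = d.modify k [] (fun l => l ++ (ws ++ vs)) := by
  induction vs generalizing ws with
  | nil => simp
  | cons v t ih =>
    rw [List.foldl_cons, pv_pushV_eq_modify, pv_modify_modify]
    have : (fun l => (l ++ ws) ++ [v]) = (fun l => l ++ (ws ++ [v])) := by
      funext l; simp
    rw [this, ih (ws ++ [v])]
    simp

theorem pv_foldl_pushV_eq (k : Int) (vs : List Int) (d : PySem.Dict Int (List Int)) :
    vs.foldl (fun dd v => pvPushV k v dd) d = if vs.isEmpty then d else pvSdExtend d k vs := by
  cases vs with
  | nil => simp
  | cons v t =>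
    rw [pv_sdExtend_eq_modify, List.foldl_cons, pv_pushV_eq_modify]
    have := pv_foldl_pushV_modify k t d [v]
    simpa using this

theorem pv_foldl_pair_push (js : List Int) (k : Int) (v : Int → Int) (c : Int → Bool)
    (st : PySem.Dict Int (List Int) × PySem.Dict Int (List Int)) :
    js.foldl (fun st2 j => if c j then (pvPushV k (v j) st2.1, pvPushV k (v j) st2.2)
                           else (pvPushV k (v j) st2.1, st2.2)) st
      = (js.foldl (fun dd j => pvPushV k (v j) dd) st.1,
         (js.filter c).foldl (fun dd j => pvPushV k (v j) dd) st.2) := by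
  induction js generalizing st with
  | nil => simp
  | cons j t ih =>
    by_cases hc : c j
    · simp only [List.foldl_cons, List.filter_cons, hc, if_true, ih]
    · simp only [List.foldl_cons, List.filter_cons, hc, if_false, ih, Bool.false_eq_true]

theorem pv_foldl_range_eq {ζ σ : Type} (zs : List ζ) (F : σ → Nat → σ) (G : σ → ζ → σ) (init : σ)
    (h : ∀ st (k : Nat) (hk : k < zs.length), F st k = G st zs[k]) :
    (List.range zs.length).foldl F init = zs.foldl G init := by
  induction zs generalizing F init with
  | nil => simp
  | cons z t ih =>
    rw [List.length_cons, List.range_succ_eq_map, List.foldl_cons, List.foldl_map]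
    rw [ih (fun st k => F st (k + 1)) (F init 0)
         (fun st k hk => by simpa using h st (k + 1) (by simpa using hk))]
    rw [h init 0 (by simp)]
    rfl

theorem pv_listSplit_get (xs : List Int) (k : Nat) (h : k < xs.length) :
    PySem.List.pyGet? (pvListSplit xs) ((k : Nat) : Int) = some [xs[k]] := by
  unfold pvListSplit
  rw [PySem.List.len_eq, PySem.List.pyGet?_natCast,
      PySem.List.getElem?_map_pyRange_zero _ _ _ h]
  have h1 : ((k : Int) + 1) = ((k + 1 : Nat) : Int) := by push_cast; ring
  rw [h1, PySem.List.slice_natCast]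
  have h2 : k + 1 - k = 1 := by omega
  have h3 : xs.drop k = xs[k] :: xs.drop (k + 1) := (List.getElem_cons_drop h).symm
  rw [h2, h3, List.take_succ_cons, List.take_zero]

-- A's per-pair test, characterised elementwise (within the Pre_ bounds)
theorem pv_cond_eq (qa ua : List Int) (d : Int)
    (hq : d ≤ (qa.length : Int)) (hu : d ≤ (ua.length : Int)) :
    pvIsSameCate qa ua d = (PySem.List.pyRange 0 d 1).any (fun i =>
      (PySem.List.pyGetD qa i 0 == 1) && (PySem.List.pyGetD ua i 0 == 1)) := by
  have key : ∀ (i : Int), i ∈ PySem.List.pyRange 0 d 1 →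
      ((PySem.List.pyGet? (pvListSplit qa) i == some [1]) &&
       (PySem.List.pyGet? (pvListSplit qa) i == PySem.List.pyGet? (pvListSplit ua) i))
      = ((PySem.List.pyGetD qa i 0 == 1) && (PySem.List.pyGetD ua i 0 == 1)) := by
    intro i hi
    rw [PySem.List.mem_pyRange_one] at hi
    obtain ⟨h0, hlt⟩ := hi
    set k := i.toNat with hk
    have hik : i = (k : Int) := by omega
    have hkq : k < qa.length := by omega
    have hku : k < ua.length := by omega
    rw [hik, pv_listSplit_get qa k hkq, pv_listSplit_get ua k hku,
        PySem.List.pyGetD_natCast, PySem.List.pyGetD_natCast,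
        List.getD_eq_getElem qa 0 hkq, List.getD_eq_getElem ua 0 hku]
    by_cases h1 : qa[k] = 1
    · simp [h1, eq_comm]
    · have hf : (qa[k] == 1) = false := by simp [h1]
      rw [hf]
      simp [h1]
  unfold pvIsSameCate
  exact PySem.List.any_congr_mem key

-- membership in the union fold that builds hit
theorem pv_mem_foldl_update (xs : List Int) (P : Int → Bool) (B : Int → List Int)
    (s : PySem.Set Int) (j : Int) :
    (j ∈ xs.foldl (fun h i => if P i then PySem.Set.update h (B i) else h) s)
      ↔ (j ∈ s ∨ ∃ i ∈ xs, P i = true ∧ j ∈ B i) := by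
  induction xs generalizing s with
  | nil => simp
  | cons x t ih =>
    rw [List.foldl_cons]
    by_cases hx : P x
    · rw [if_pos hx, ih]
      rw [PySem.Set.mem_update]
      constructor
      · rintro (⟨hs | hb⟩ | h)
        · exact Or.inl hs
        · exact Or.inr ⟨x, by simp, hx, hb⟩
        · obtain ⟨i, hi, hp, hb⟩ := h
          exact Or.inr ⟨i, by simp [hi], hp, hb⟩
      · rintro (hs | ⟨i, hi, hp, hb⟩)
        · exact Or.inl (Or.inl hs)
        · rcases List.mem_cons.mp hi with rfl | hit
          · exact Or.inl (Or.inr hb)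
          · exact Or.inr ⟨i, hit, hp, hb⟩
    · rw [if_neg (by simpa using hx), ih]
      constructor
      · rintro (hs | ⟨i, hi, hp, hb⟩)
        · exact Or.inl hs
        · exact Or.inr ⟨i, by simp [hi], hp, hb⟩
      · rintro (hs | ⟨i, hi, hp, hb⟩)
        · exact Or.inl hs
        · rcases List.mem_cons.mp hi with rfl | hit
          · exact absurd hp (by simpa using hx)
          · exact Or.inr ⟨i, hit, hp, hb⟩

theorem pv_nodup_foldl_update (xs : List Int) (P : Int → Bool) (B : Int → List Int)
    (s : PySem.Set Int) (hs : s.Nodup) :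
    (xs.foldl (fun h i => if P i then PySem.Set.update h (B i) else h) s).Nodup := by
  induction xs generalizing s with
  | nil => exact hs
  | cons x t ih =>
    rw [List.foldl_cons]
    by_cases hx : P x
    · rw [if_pos hx]
      exact ih _ (PySem.Set.nodup_update s (B x) hs)
    · rw [if_neg (by simpa using hx)]
      exact ih _ hs

theorem pv_map_val_eq (ul : List (List Int)) :
    (PySem.List.pyRange 0 (PySem.List.len ul) 1).map
        (fun j => PySem.List.pyGetD (PySem.List.pyGetD ul j ([] : List Int)) 0 0)
      = ul.map (fun u => PySem.List.pyGetD u 0 0) := by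
  conv_rhs => rw [← PySem.List.map_pyGetD_pyRange_zero ul ([] : List Int), List.map_map]
  rfl

-- the filtered index list on A's side: membership and strict order
theorem pv_Ljs_pairwise (U : Int) (c : Int → Bool) :
    ((PySem.List.pyRange 0 U 1).filter c).Pairwise (fun a b => a < b) := by
  exact List.Pairwise.filter _ (PySem.List.pairwise_lt_pyRange_one 0 U)

-- hit, sorted, equals the filtered index list (within the Pre_ bounds)
theorem pv_hit_eq (ul ulab : List (List Int)) (qrow : List Int) (d : Int)
    (hue : ∀ j : Nat, j < ul.length → d ≤ ((ulab.getD j []).length : Int))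
    (hdq : d ≤ (qrow.length : Int)) :
    PySem.List.sorted (pvHit qrow (pvBuckets ulab (PySem.List.len ul) d) d) (fun x => x) false
      = (PySem.List.pyRange 0 (PySem.List.len ul) 1).filter
          (fun j => pvIsSameCate qrow (PySem.List.pyGetD ulab j []) d) := by
  set U := PySem.List.len ul with hUdef
  set Ljs := (PySem.List.pyRange 0 U 1).filter
      (fun j => pvIsSameCate qrow (PySem.List.pyGetD ulab j []) d) with hL
  set hit := pvHit qrow (pvBuckets ulab U d) d with hH
  -- membership in hit = membership in Ljs
  have hmem : ∀ j : Int, j ∈ hit ↔ j ∈ Ljs := by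
    intro j
    rw [hH, pvHit, pv_mem_foldl_update]
    rw [hL, List.mem_filter]
    have hbk : ∀ i ∈ PySem.List.pyRange 0 d 1,
        PySem.List.pyGetD (pvBuckets ulab U d) i []
          = (PySem.List.pyRange 0 U 1).filter (fun j =>
              PySem.List.pyGetD (PySem.List.pyGetD ulab j []) i 0 == 1) := by
      intro i hi
      rw [PySem.List.mem_pyRange_one] at hi
      obtain ⟨h0, hlt⟩ := hi
      rw [pvBuckets, PySem.List.pyGetD_map_pyRange_of_nonneg _ _ _ _ h0 hlt]
    constructor
    · rintro (hs | ⟨i, hi, hp, hb⟩)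
      · simp [PySem.Set.empty] at hs
      · rw [hbk i hi, List.mem_filter] at hb
        obtain ⟨hjr, hcond⟩ := hb
        refine ⟨hjr, ?_⟩
        have hjU : 0 ≤ j ∧ j < U := by
          rwa [PySem.List.mem_pyRange_one] at hjr
        have hbound : d ≤ (((PySem.List.pyGetD ulab j []).length : Nat) : Int) := by
          have : j.toNat < ul.length := by
            rw [hUdef, PySem.List.len_eq] at hjU; omega
          have hj : j = ((j.toNat : Nat) : Int) := by omega
          rw [hj, PySem.List.pyGetD_natCast]
          exact hue j.toNat this
        rw [pv_cond_eq qrow (PySem.List.pyGetD ulab j []) d hdq hbound]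
        rw [List.any_eq_true]
        exact ⟨i, hi, by simp [hp, hcond]⟩
    · rintro ⟨hjr, hcond⟩
      have hjU : 0 ≤ j ∧ j < U := by rwa [PySem.List.mem_pyRange_one] at hjr
      have hbound : d ≤ ((PySem.List.pyGetD ulab j []).length : Int) := by
        have : j.toNat < ul.length := by
          rw [hUdef, PySem.List.len_eq] at hjU; omega
        have hj : j = ((j.toNat : Nat) : Int) := by omega
        rw [hj, PySem.List.pyGetD_natCast]
        exact hue j.toNat this
      rw [pv_cond_eq qrow (PySem.List.pyGetD ulab j []) d hdq hbound,
          List.any_eq_true] at hcond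
      obtain ⟨i, hi, hq1⟩ := hcond
      simp only [Bool.and_eq_true] at hq1
      refine Or.inr ⟨i, hi, hq1.1, ?_⟩
      rw [hbk i hi, List.mem_filter]
      exact ⟨hjr, hq1.2⟩
  have hnodupL : Ljs.Nodup := (pv_Ljs_pairwise U _).imp (fun {a b} h => by omega)
  have hnodupH : hit.Nodup := pv_nodup_foldl_update _ _ _ _ (by simp [PySem.Set.empty])
  have hperm : Ljs.Perm hit :=
    (List.perm_ext_iff_of_nodup hnodupL hnodupH).mpr (fun a => ((hmem a).symm))
  exact PySem.List.sorted_eq_of_perm_of_pairwise_lt _ _ _ hperm (pv_Ljs_pairwise U _)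

theorem pv_fold_eq (ql ul qlab ulab : List (List Int)) (d : Int)
    (hpq : ∀ i : Nat, i < ql.length →
      ql.getD i [] ≠ [] ∧ i < qlab.length ∧ d ≤ ((qlab.getD i []).length : Int))
    (hpu : ∀ j : Nat, j < ul.length →
      ul.getD j [] ≠ [] ∧ j < ulab.length ∧ d ≤ ((ulab.getD j []).length : Int))
    (hql : ql.length ≤ qlab.length) :
    (PySem.List.pyRange 0 (PySem.List.len ql) 1).foldl
      (fun st i =>
        (PySem.List.pyRange 0 (PySem.List.len ul) 1).foldl
          (fun st2 j =>
            if pvIsSameCate (PySem.List.pyGetD qlab i []) (PySem.List.pyGetD ulab j []) d then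
              (pvPushQuery (PySem.List.pyGetD ql i []) (PySem.List.pyGetD ul j []) st2.1,
               pvPushQuery (PySem.List.pyGetD ql i []) (PySem.List.pyGetD ul j []) st2.2)
            else
              (pvPushQuery (PySem.List.pyGetD ql i []) (PySem.List.pyGetD ul j []) st2.1, st2.2)) st)
      (PySem.Dict.empty, PySem.Dict.empty)
    = (ql.zip qlab).foldl
      (fun st p =>
        let key := PySem.List.pyGetD p.1 0 0
        let hit := pvHit p.2 (pvBuckets ulab (PySem.List.len ul) d) d
        ((if (ul.map (fun u => PySem.List.pyGetD u 0 0)).isEmpty then st.1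
          else pvSdExtend st.1 key (ul.map (fun u => PySem.List.pyGetD u 0 0))),
         (if hit.isEmpty then st.2
          else pvSdExtend st.2 key
            ((PySem.List.sorted hit (fun x => x) false).map
              (fun j => PySem.List.pyGetD (ul.map (fun u => PySem.List.pyGetD u 0 0)) j 0)))))
      (PySem.Dict.empty, PySem.Dict.empty) := by
  rw [PySem.List.len_eq ql, PySem.List.pyRange_zero_nat, List.foldl_map]
  have hlen : (ql.zip qlab).length = ql.length := by
    rw [List.length_zip]; omega
  rw [← hlen]
  apply pv_foldl_range_eq
  intro st k hk
  rw [hlen] at hk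
  rw [List.getElem_zip]
  have hkq : k < qlab.length := by omega
  have e1 : PySem.List.pyGetD ql ((k : Nat) : Int) [] = ql[k] := by
    rw [PySem.List.pyGetD_natCast]; exact List.getD_eq_getElem ql [] hk
  have e2 : PySem.List.pyGetD qlab ((k : Nat) : Int) [] = qlab[k] := by
    rw [PySem.List.pyGetD_natCast]; exact List.getD_eq_getElem qlab [] hkq
  simp only [pvPushQuery_eq, e1, e2]
  rw [pv_foldl_pair_push]
  rw [← List.foldl_map (f := fun j => PySem.List.pyGetD (PySem.List.pyGetD ul j []) 0 0)
        (g := fun dd u => pvPushV (PySem.List.pyGetD ql[k] 0 0) u dd)]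
  rw [← List.foldl_map (f := fun j => PySem.List.pyGetD (PySem.List.pyGetD ul j []) 0 0)
        (g := fun dd u => pvPushV (PySem.List.pyGetD ql[k] 0 0) u dd)]
  rw [pv_map_val_eq]
  have hdq : d ≤ ((qlab[k].length : Nat) : Int) := by
    have := (hpq k hk).2.2; rwa [List.getD_eq_getElem qlab [] hkq] at this
  have hLeq := pv_hit_eq ul ulab qlab[k] d (fun j hj => (hpu j hj).2.2) hdq
  -- rewrite the pos value list of A into B's form
  have hmapagree :
      ((PySem.List.pyRange 0 (PySem.List.len ul) 1).filter
          (fun j => pvIsSameCate qlab[k] (PySem.List.pyGetD ulab j []) d)).map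
          (fun j => PySem.List.pyGetD (PySem.List.pyGetD ul j []) 0 0)
      = ((PySem.List.pyRange 0 (PySem.List.len ul) 1).filter
          (fun j => pvIsSameCate qlab[k] (PySem.List.pyGetD ulab j []) d)).map
          (fun j => PySem.List.pyGetD (ul.map (fun u => PySem.List.pyGetD u 0 0)) j 0) := by
    apply List.map_congr_left
    intro j hj
    have hjr : j ∈ PySem.List.pyRange 0 (PySem.List.len ul) 1 := (List.mem_filter.mp hj).1
    rw [PySem.List.mem_pyRange_one, PySem.List.len_eq] at hjr
    have hjn : j = ((j.toNat : Nat) : Int) := by omega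
    have hjl : j.toNat < ul.length := by omega
    rw [hjn, PySem.List.pyGetD_natCast, PySem.List.pyGetD_natCast,
        List.getD_eq_getElem ul [] hjl,
        List.getD_eq_getElem _ 0 (by simpa using hjl), List.getElem_map]
  rw [hmapagree, ← hLeq]
  rw [pv_foldl_pushV_eq, pv_foldl_pushV_eq]
  have hE : ((PySem.List.sorted (pvHit qlab[k] (pvBuckets ulab (PySem.List.len ul) d) d)
        (fun x => x) false).map
        (fun j => PySem.List.pyGetD (ul.map (fun u => PySem.List.pyGetD u 0 0)) j 0)).isEmpty
      = (pvHit qlab[k] (pvBuckets ulab (PySem.List.len ul) d) d).isEmpty := by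
    rw [Bool.eq_iff_iff, List.isEmpty_iff, List.isEmpty_iff, List.map_eq_nil_iff,
        PySem.List.sorted_eq_nil_iff]
  rw [hE]

-- ===== VERDICT (by name: the statement is the Claim_ definition above) =====
theorem make_test_dict_spec : Claim_equal_make_test_dict := by
  intro ql ul qlab ulab d _hdom hpre
  obtain ⟨hpq, hpu⟩ := hpre
  have hql : ql.length ≤ qlab.length := by
    rcases Nat.eq_zero_or_pos ql.length with h | h
    · omega
    · have := (hpq (ql.length - 1) (by omega)).2.1; omega
  show make_test_dict ql ul qlab ulab d = make_test_dict_alt ql ul qlab ulab d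
  simp only [make_test_dict, make_test_dict_alt]
  rw [pv_fold_eq ql ul qlab ulab d hpq hpu hql]
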